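-- pv_equiv track=rewrite | github.com/arthursowani145-ux/Trinity-Med | tools/trinity_clinical_translator_v21.py | _risk_level_from_timeline
-- ===== SOURCE A (Python) =====
-- def _risk_level_from_timeline(timeline, seizure_at, lead_time):
--     """
--     Derive risk from actual classified states in the timeline,
--     not just the raw peak ratio (which is relative to a tiny baseline
--     and can inflate misleadingly).
--
--     Rule: if a clinical seizure was annotated, minimum risk is HIGH.
--     Lead time refines upward to CRITICAL if warning was very short.
--     """
--     if not timeline:
--         return "LOW"
--
--     has_ictal    = any(t.get("state") == "Seizure"          for t in timeline)
--     has_preictal = any(t.get("state") == "Pre-ictal"        for t in timeline)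
--     has_ied      = any(t.get("state") == "Interictal Spike" for t in timeline)
--
--     if seizure_at:
--         # Confirmed clinical seizure — always at least HIGH
--         if not lead_time or lead_time <= 60:
--             return "CRITICAL"   # Seizure at onset or very short warning
--         elif lead_time <= 300:
--             return "HIGH"       # Less than 5 min warning
--         else:
--             return "HIGH"       # Long warning — still HIGH, seizure confirmed
--     elif has_ictal:
--         return "HIGH"
--     elif has_preictal:
--         return "MODERATE"
--     elif has_ied:
--         return "LOW-MODERATE"
--     else:
--         return "LOW"
-- ===== SOURCE B (Python) =====
-- def _risk_level_from_timeline(timeline, seizure_at, lead_time):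
--     # A confirmed clinical seizure (on a non-empty timeline) short-circuits:
--     # CRITICAL on no/zero/short warning, HIGH otherwise.
--     if seizure_at and timeline:
--         return "CRITICAL" if (not lead_time or lead_time <= 60) else "HIGH"
--     # Otherwise reduce the timeline to a single numeric severity (max over a
--     # rank lattice) and index the label table with it; empty timeline -> 0 -> LOW.
--     rank = {"Interictal Spike": 1, "Pre-ictal": 2, "Seizure": 3}
--     sev = 0
--     for t in timeline:
--         sev = max(sev, rank.get(t.get("state"), 0))
--     return ("LOW", "LOW-MODERATE", "MODERATE", "HIGH")[sev]
-- ===== Notes on version B (the rewrite author's own statement) =====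
-- stated objective: alternative
-- what changed: B replaces A's three any() scans plus elif priority chain with a single max-fold that reduces the timeline to a numeric severity rank (Seizure=3 > Pre-ictal=2 > Interictal Spike=1 > 0) and then indexes a label table with that rank; the empty-timeline LOW falls out of the fold's 0 identity instead of a guard.
import Mathlib
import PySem

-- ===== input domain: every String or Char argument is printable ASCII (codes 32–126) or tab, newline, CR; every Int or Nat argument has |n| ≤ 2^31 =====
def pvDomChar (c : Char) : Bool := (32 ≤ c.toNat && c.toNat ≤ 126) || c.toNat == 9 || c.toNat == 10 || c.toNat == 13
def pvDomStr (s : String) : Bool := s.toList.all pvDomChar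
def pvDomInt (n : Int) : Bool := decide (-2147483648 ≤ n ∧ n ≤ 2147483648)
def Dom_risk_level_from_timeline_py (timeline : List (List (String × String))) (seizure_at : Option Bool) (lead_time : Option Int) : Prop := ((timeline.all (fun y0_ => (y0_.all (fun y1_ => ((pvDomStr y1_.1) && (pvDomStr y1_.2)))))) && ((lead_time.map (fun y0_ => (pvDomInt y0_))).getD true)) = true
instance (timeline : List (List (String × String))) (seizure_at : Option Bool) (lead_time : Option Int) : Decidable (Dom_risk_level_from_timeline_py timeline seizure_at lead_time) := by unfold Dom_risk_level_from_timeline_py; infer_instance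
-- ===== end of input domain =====

-- B replaces A's three any() scans and elif priority chain with one max-fold to a numeric
-- severity rank plus a label table (objective: alternative). Return-value equivalence; no mutation.

-- ===== PORT A =====
-- t.get("state") on the association-list dict: first-match lookup (List.lookup).
def risk_level_from_timeline_py (timeline : List (List (String × String))) (seizure_at : Option Bool) (lead_time : Option Int) : String :=
  if timeline.isEmpty then "LOW"
  else
    let has_ictal    := timeline.any (fun t => t.lookup "state" == some "Seizure")
    let has_preictal := timeline.any (fun t => t.lookup "state" == some "Pre-ictal")
    let has_ied      := timeline.any (fun t => t.lookup "state" == some "Interictal Spike")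
    if seizure_at.getD false then
      -- 'not lead_time or lead_time <= 60': lead_time is falsy when None or 0
      match lead_time with
      | none => "CRITICAL"
      | some v => if v = 0 ∨ v ≤ 60 then "CRITICAL"
                  else if v ≤ 300 then "HIGH"
                  else "HIGH"
    else if has_ictal then "HIGH"
    else if has_preictal then "MODERATE"
    else if has_ied then "LOW-MODERATE"
    else "LOW"

-- ===== PORT B =====
-- the rank dict of Source B
def pvRank : PySem.Dict String Int :=
  PySem.Dict.ofList [("Interictal Spike", 1), ("Pre-ictal", 2), ("Seizure", 3)]

def risk_level_from_timeline_py_alt (timeline : List (List (String × String))) (seizure_at : Option Bool) (lead_time : Option Int) : String :=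
  if seizure_at.getD false && !timeline.isEmpty then
    match lead_time with
    | none => "CRITICAL"
    | some v => if v = 0 ∨ v ≤ 60 then "CRITICAL" else "HIGH"
  else
    -- rank.get(t.get("state"), 0): a None state never matches a string key, so it yields 0
    let sev : Int := timeline.foldl (fun a t =>
      max a (match t.lookup "state" with
             | some s => PySem.Dict.getD pvRank s 0
             | none => 0)) 0
    -- tuple indexing ("LOW","LOW-MODERATE","MODERATE","HIGH")[sev]; sev ∈ {0,1,2,3}, so exact
    if sev = 1 then "LOW-MODERATE" else if sev = 2 then "MODERATE" else if sev = 3 then "HIGH" else "LOW"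

-- ===== PRECONDITION & SPEC =====
def Spec_risk_level_from_timeline_py (timeline : List (List (String × String))) (seizure_at : Option Bool) (lead_time : Option Int) (out : String) : Prop := out = risk_level_from_timeline_py_alt timeline seizure_at lead_time
instance (timeline : List (List (String × String))) (seizure_at : Option Bool) (lead_time : Option Int) (out : String) : Decidable (Spec_risk_level_from_timeline_py timeline seizure_at lead_time out) := by unfold Spec_risk_level_from_timeline_py; infer_instance

-- ===== CLAIM (what is proved, stated in full; the proofs are below) =====
def Claim_equal_risk_level_from_timeline_py : Prop := ∀ (timeline : List (List (String × String))) (seizure_at : Option Bool) (lead_time : Option Int), Dom_risk_level_from_timeline_py timeline seizure_at lead_time → Spec_risk_level_from_timeline_py timeline seizure_at lead_time (risk_level_from_timeline_py timeline seizure_at lead_time)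

-- ===== LEMMAS AND PROOFS =====

-- the per-element step of B's fold
def pvStep (a : Int) (t : List (String × String)) : Int :=
  max a (match t.lookup "state" with
         | some s => PySem.Dict.getD pvRank s 0
         | none => 0)

-- the severity A's three any() flags determine
def pvSevOf (l : List (List (String × String))) : Int :=
  if l.any (fun t => t.lookup "state" == some "Seizure") then 3
  else if l.any (fun t => t.lookup "state" == some "Pre-ictal") then 2
  else if l.any (fun t => t.lookup "state" == some "Interictal Spike") then 1
  else 0

theorem pvSevOf_nonneg (l : List (List (String × String))) : 0 ≤ pvSevOf l := by
  unfold pvSevOf; split_ifs <;> norm_num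

theorem pvStep_head (t : List (String × String)) (a : Int) :
    pvStep a t =
      max a (if t.lookup "state" == some "Seizure" then 3
             else if t.lookup "state" == some "Pre-ictal" then 2
             else if t.lookup "state" == some "Interictal Spike" then 1 else 0) := by
  unfold pvStep
  cases h : t.lookup "state" with
  | none => simp
  | some s =>
    by_cases h1 : s = "Seizure"
    · subst h1; simp [pvRank, PySem.Dict.getD]; rfl
    · by_cases h2 : s = "Pre-ictal"
      · subst h2; simp [pvRank, PySem.Dict.getD]; rfl
      · by_cases h3 : s = "Interictal Spike"
        · subst h3; simp [pvRank, PySem.Dict.getD]; rfl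
        · have hz : PySem.Dict.getD pvRank s 0 = 0 := by
            unfold pvRank
            rw [show PySem.Dict.ofList [("Interictal Spike", (1:Int)), ("Pre-ictal", 2), ("Seizure", 3)]
                = PySem.Dict.mk [("Interictal Spike", (1:Int)), ("Pre-ictal", 2), ("Seizure", 3)] from by decide]
            simp [PySem.Dict.getD, PySem.Dict.get?, List.find?,
              beq_eq_false_iff_ne.mpr (fun hh => h1 hh.symm),
              beq_eq_false_iff_ne.mpr (fun hh => h2 hh.symm),
              beq_eq_false_iff_ne.mpr (fun hh => h3 hh.symm)]
          simp [h1, h2, h3, hz]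

theorem pvFold_eq_sevOf (l : List (List (String × String))) :
    ∀ a : Int, 0 ≤ a → l.foldl pvStep a = max a (pvSevOf l) := by
  induction l with
  | nil => intro a ha; simp [pvSevOf]; omega
  | cons t tl ih =>
    intro a ha
    have hstep : 0 ≤ pvStep a t := by rw [pvStep_head]; split_ifs <;> omega
    rw [List.foldl_cons, ih _ hstep, pvStep_head]
    unfold pvSevOf
    simp only [List.any_cons, Bool.or_eq_true]
    split_ifs <;> first | omega | tauto

-- ===== VERDICT (by name: the statement is the Claim_ definition above) =====
theorem risk_level_from_timeline_py_spec : Claim_equal_risk_level_from_timeline_py := by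
  intro timeline seizure_at lead_time _
  unfold Spec_risk_level_from_timeline_py risk_level_from_timeline_py risk_level_from_timeline_py_alt
  have hfold : timeline.foldl (fun a t =>
      max a (match t.lookup "state" with
             | some s => PySem.Dict.getD pvRank s 0
             | none => 0)) 0 = pvSevOf timeline := by
    have := pvFold_eq_sevOf timeline 0 le_rfl
    rw [show (fun a t => max a (match t.lookup "state" with
             | some s => PySem.Dict.getD pvRank s 0
             | none => 0)) = pvStep from rfl, this]
    have := pvSevOf_nonneg timeline
    omega
  by_cases he : timeline.isEmpty
  · have : timeline = [] := List.isEmpty_iff.mp he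
    subst this
    simp
  · simp only [he, Bool.not_false, Bool.and_true]
    by_cases hs : seizure_at.getD false
    · simp only [hs, if_true]
      cases lead_time with
      | none => rfl
      | some v => by_cases h1 : v = 0 ∨ v ≤ 60 <;> by_cases h2 : v ≤ 300 <;> simp [h1, h2]
    · simp only [hs, Bool.false_eq_true, if_false, hfold]
      unfold pvSevOf
      split_ifs <;> first | rfl | omega
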